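-- pv_equiv track=rewrite | github.com/primkey7607/llms_for_ac | drspider_to_acms.py | account_for_dups
-- ===== SOURCE A (Python) =====
-- def account_for_dups(query_lst):
--     qdups = {}
--     qinds = {}
--     out_lst = []
--     for i,q in enumerate(query_lst):
--         if q in qinds:
--             view_st = 'query' + str(qinds[q]) + 'view' + str(qdups[q])
--             new_st = 'CREATE VIEW ' + view_st + ' ' + q
--             out_lst.append(new_st)
--             qdups[q] += 1
--         else:
--             if len(qinds) == 0:
--                 qinds[q] = 0
--             else:
--                 max_ind = max([qinds[el] for el in qinds])
--                 qinds[q] = max_ind + 1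
--
--             qdups[q] = 1
--             view_st = 'query' + str(qinds[q]) + 'view0'
--             new_st = 'CREATE VIEW ' + view_st + ' ' + q
--             out_lst.append(new_st)
--
--     return out_lst
-- ===== SOURCE B (Python) =====
-- def account_for_dups(query_lst):
--     # Pass 1: rank each distinct query by first appearance.
--     ranks = {}
--     for q in query_lst:
--         if q not in ranks:
--             ranks[q] = len(ranks)
--     # Pass 2: emit statements, numbering occurrences per query.
--     counts = {}
--     out_lst = []
--     for q in query_lst:
--         c = counts.get(q, 0)
--         out_lst.append('CREATE VIEW query' + str(ranks[q]) + 'view' + str(c) + ' ' + q)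
--         counts[q] = c + 1
--     return out_lst
-- ===== Notes on version B (the rewrite author's own statement) =====
-- stated objective: faster
-- what changed: Replaces A's single fused loop, which recomputes max over all stored indices at every new query, by two passes: one pass builds an ordered rank table (rank = table size at insertion), a second pass emits the statements with a per-query occurrence counter.
import Mathlib
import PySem

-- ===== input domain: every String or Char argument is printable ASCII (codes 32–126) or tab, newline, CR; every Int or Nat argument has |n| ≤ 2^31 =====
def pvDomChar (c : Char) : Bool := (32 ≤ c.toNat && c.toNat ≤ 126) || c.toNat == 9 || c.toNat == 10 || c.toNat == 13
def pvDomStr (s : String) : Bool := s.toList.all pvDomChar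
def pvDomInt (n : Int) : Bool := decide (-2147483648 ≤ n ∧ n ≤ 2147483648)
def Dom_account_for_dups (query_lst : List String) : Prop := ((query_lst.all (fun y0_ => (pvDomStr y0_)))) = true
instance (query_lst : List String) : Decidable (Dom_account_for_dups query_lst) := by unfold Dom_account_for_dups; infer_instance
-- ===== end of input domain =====

-- B replaces A's single fused loop (which rescans all stored indices with max at every new query) by two
-- passes: a rank table built first, then statement emission with an occurrence counter; a timing run measured B faster.

-- ===== PORT A =====
-- A-side helper: one iteration of A's loop, state (qdups, qinds, out_lst).
def pvStepA (st : PySem.Dict String Int × PySem.Dict String Int × List String) (q : String) :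
    PySem.Dict String Int × PySem.Dict String Int × List String :=
  let qdups := st.1
  let qinds := st.2.1
  let out_lst := st.2.2
  match qinds.get? q with
  | some ind =>
      -- qdups[q] / qinds[q] reads: keys are present here (guarded by 'q in qinds'), so getD is exact
      let view_st := "query" ++ PySem.Int.toStr ind ++ "view" ++ PySem.Int.toStr (qdups.getD q 0)
      let new_st := "CREATE VIEW " ++ view_st ++ " " ++ q
      (qdups.modify q 0 (· + 1), qinds, out_lst ++ [new_st])
  | none =>
      let qinds' :=
        if qinds.size = 0 then qinds.insert q 0
        else
          match PySem.List.max? (qinds.keys.map (fun el => qinds.getD el 0)) (fun x => x) with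
          | some max_ind => qinds.insert q (max_ind + 1)
          | none => qinds.insert q 0  -- unreachable: qinds is nonempty in this branch
      let qdups' := qdups.insert q 1
      let view_st := "query" ++ PySem.Int.toStr (qinds'.getD q 0) ++ "view0"
      let new_st := "CREATE VIEW " ++ view_st ++ " " ++ q
      (qdups', qinds', out_lst ++ [new_st])

def account_for_dups (query_lst : List String) : List String :=
  (query_lst.foldl pvStepA (PySem.Dict.empty, PySem.Dict.empty, [])).2.2

-- ===== PORT B =====
-- B-side helpers: pass-1 step (rank table), statement builder, pass-2 step (counter + output).
def pvRkStep (r : PySem.Dict String Int) (q : String) : PySem.Dict String Int :=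
  if r.contains q then r else r.insert q (r.size : Int)

def pvMkStmt (rank cnt : Int) (q : String) : String :=
  "CREATE VIEW query" ++ PySem.Int.toStr rank ++ "view" ++ PySem.Int.toStr cnt ++ " " ++ q

def pvEmitStep (R : PySem.Dict String Int) (st : PySem.Dict String Int × List String) (q : String) :
    PySem.Dict String Int × List String :=
  (st.1.insert q (st.1.getD q 0 + 1), st.2 ++ [pvMkStmt (R.getD q 0) (st.1.getD q 0) q])

def account_for_dups_alt (query_lst : List String) : List String :=
  (query_lst.foldl (pvEmitStep (query_lst.foldl pvRkStep PySem.Dict.empty))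
    (PySem.Dict.empty, [])).2

-- ===== PRECONDITION & SPEC =====
def Spec_account_for_dups (query_lst : List String) (out : List String) : Prop := out = account_for_dups_alt query_lst
instance (query_lst : List String) (out : List String) : Decidable (Spec_account_for_dups query_lst out) := by unfold Spec_account_for_dups; infer_instance

-- ===== CLAIM (what is proved, stated in full; the proofs are below) =====
def Claim_equal_account_for_dups : Prop := ∀ (query_lst : List String), Dom_account_for_dups query_lst → Spec_account_for_dups query_lst (account_for_dups query_lst)

-- ===== LEMMAS AND PROOFS =====

-- Proof-only fused machine: B's two passes fused into one loop, state (counts, ranks, out).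
def pvStF (st : PySem.Dict String Int × PySem.Dict String Int × List String) (q : String) :
    PySem.Dict String Int × PySem.Dict String Int × List String :=
  (st.1.insert q (st.1.getD q 0 + 1), pvRkStep st.2.1 q,
   st.2.2 ++ [pvMkStmt ((pvRkStep st.2.1 q).getD q 0) (st.1.getD q 0) q])

-- max over the already-assigned ranks 0..n-1 is n-1
theorem pv_maxVal (n : Nat) (hn : 0 < n) :
    PySem.List.max? ((List.range n).map (fun i => Int.ofNat i)) (fun x => x) = some ((n : Int) - 1) := by
  set xs := (List.range n).map (fun i => Int.ofNat i) with hxs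
  have hne : xs ≠ [] := by
    rw [hxs]; intro h
    have := congrArg List.length h
    simp at this; omega
  obtain ⟨m, hm⟩ : ∃ m, PySem.List.max? xs (fun x => x) = some m := by
    cases h : PySem.List.max? xs (fun x => x) with
    | none => exact absurd ((PySem.List.max?_eq_none_iff xs _).mp h) hne
    | some m => exact ⟨m, rfl⟩
  have hmem := PySem.List.max?_mem hm
  have hmax := PySem.List.max?_isMax hm
  rw [hm]
  obtain ⟨k, hk, hkm⟩ : ∃ k, k < n ∧ Int.ofNat k = m := by
    simpa [hxs] using hmem
  have hin : Int.ofNat (n - 1) ∈ xs := by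
    rw [hxs]
    exact List.mem_map_of_mem (List.mem_range.mpr (Nat.sub_lt hn one_pos))
  have h1 := hmax _ hin
  simp only [] at h1
  congr 1
  simp only [Int.ofNat_eq_natCast] at hkm h1
  omega

-- membership in the rank table = membership in the list (over any start table)
theorem pv_rk_contains (l : List String) (d : PySem.Dict String Int) (q : String) :
    (l.foldl pvRkStep d).contains q = (d.contains q || decide (q ∈ l)) := by
  induction l generalizing d with
  | nil => simp
  | cons a t ih =>
    simp only [List.foldl_cons, ih, pvRkStep]
    by_cases h : d.contains a = true
    · simp [h, List.mem_cons]
      by_cases hq : q = a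
      · subst hq; simp [h]
      · simp [hq]
    · simp only [Bool.not_eq_true] at h
      simp [h, PySem.Dict.contains_insert, List.mem_cons]
      by_cases hq : q = a
      · subst hq; simp
      · simp [hq, beq_eq_false_iff_ne.mpr hq]

-- counts component of the emit fold does not depend on the rank table
theorem pv_emit_fst (l : List String) (R : PySem.Dict String Int)
    (c : PySem.Dict String Int) (o : List String) :
    (l.foldl (pvEmitStep R) (c, o)).1 = l.foldl (fun d x => d.insert x (d.getD x 0 + 1)) c := by
  induction l generalizing c o with
  | nil => rfl
  | cons a t ih => simp only [List.foldl_cons, pvEmitStep, ih]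

-- the emit fold only reads the rank table at members of the list
theorem pv_emit_congr (l : List String) (R R' : PySem.Dict String Int)
    (h : ∀ x ∈ l, R.getD x 0 = R'.getD x 0) (st : PySem.Dict String Int × List String) :
    l.foldl (pvEmitStep R) st = l.foldl (pvEmitStep R') st := by
  exact PySem.List.foldl_congr_mem' l _ _ st
    (fun x hx acc => by simp only [pvEmitStep, h x hx])

-- the fused machine computes B's two passes
theorem pv_fused_eq_B (l : List String) :
    l.foldl pvStF (PySem.Dict.empty, PySem.Dict.empty, []) =
      ((l.foldl (fun (d : PySem.Dict String Int) x => d.insert x (d.getD x 0 + 1)) PySem.Dict.empty),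
       l.foldl pvRkStep PySem.Dict.empty,
       (l.foldl (pvEmitStep (l.foldl pvRkStep PySem.Dict.empty)) (PySem.Dict.empty, [])).2) := by
  induction l using List.reverseRecOn with
  | nil => rfl
  | append_singleton t q ih =>
    have hR' : (t ++ [q]).foldl pvRkStep PySem.Dict.empty =
        pvRkStep (t.foldl pvRkStep PySem.Dict.empty) q := by
      rw [List.foldl_append]; rfl
    have hpre : t.foldl (pvEmitStep (pvRkStep (t.foldl pvRkStep PySem.Dict.empty) q)) (PySem.Dict.empty, []) =
        t.foldl (pvEmitStep (t.foldl pvRkStep PySem.Dict.empty)) (PySem.Dict.empty, []) := by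
      by_cases hc : (t.foldl pvRkStep PySem.Dict.empty).contains q = true
      · simp [pvRkStep, hc]
      · simp only [Bool.not_eq_true] at hc
        refine pv_emit_congr t _ _ (fun x hx => ?_) _
        have hxc : (t.foldl pvRkStep PySem.Dict.empty).contains x = true := by
          rw [pv_rk_contains]; simp [hx]
        have hne : x ≠ q := fun e => by rw [e, hc] at hxc; exact absurd hxc (by simp)
        simp only [pvRkStep, hc, Bool.false_eq_true, if_false]
        rw [PySem.Dict.getD_insert_of_ne _ _ _ hne]
    rw [List.foldl_append, ih, hR']
    rw [List.foldl_append, List.foldl_append, hpre]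
    simp only [List.foldl_cons, List.foldl_nil, pvStF, pvEmitStep, pv_emit_fst]

-- string reassociation, duplicate branch
theorem pv_strA (a b : String) (q : String) :
    "CREATE VIEW " ++ ("query" ++ a ++ "view" ++ b) ++ " " ++ q =
      "CREATE VIEW query" ++ a ++ "view" ++ b ++ " " ++ q := by
  have h : ("CREATE VIEW " ++ "query" : String) = "CREATE VIEW query" := rfl
  simp only [← String.append_assoc, h]

-- string reassociation, fresh branch ('view0' = 'view' + str(0))
theorem pv_strB (a : String) (q : String) :
    "CREATE VIEW " ++ ("query" ++ a ++ "view0") ++ " " ++ q =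
      "CREATE VIEW query" ++ a ++ "view" ++ PySem.Int.toStr 0 ++ " " ++ q := by
  have h : ("CREATE VIEW " ++ "query" : String) = "CREATE VIEW query" := rfl
  have h0 : ("view0" : String) = "view" ++ PySem.Int.toStr 0 := rfl
  simp only [h0, ← String.append_assoc, h]

-- A's loop = the fused machine, under the loop invariant: qinds has nodup keys, qdups and qinds
-- share their key set, and the stored indices are exactly 0..size-1 in insertion order.
theorem pv_A_eq_fused (l : List String) (c r : PySem.Dict String Int) (out : List String)
    (hnd : r.keys.Nodup) (hc : ∀ s, c.contains s = r.contains s)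
    (hv : r.values = (List.range r.size).map (fun i => Int.ofNat i)) :
    l.foldl pvStepA (c, r, out) = l.foldl pvStF (c, r, out) := by
  induction l generalizing c r out with
  | nil => rfl
  | cons q t ih =>
    simp only [List.foldl_cons]
    cases hq : r.get? q with
    | some ind =>
      have hcq : r.contains q = true := by
        rw [PySem.Dict.contains_eq_isSome_get?, hq]; rfl
      have hstep : pvRkStep r q = r := by simp [pvRkStep, hcq]
      have h2 : pvStF (c, r, out) q =
          (c.insert q (c.getD q 0 + 1), r, out ++ [pvMkStmt (ind) (c.getD q 0) q]) := by
        simp only [pvStF, hstep, PySem.Dict.getD_of_get?_eq_some r 0 hq]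
      have hA : pvStepA (c, r, out) q = pvStF (c, r, out) q := by
        rw [h2]
        simp only [pvStepA, hq]
        refine Prod.ext rfl (Prod.ext rfl ?_)
        simp only [pvMkStmt, pv_strA]
      rw [hA, h2]
      exact ih _ _ _ hnd (fun s => by
        rw [PySem.Dict.contains_insert]
        by_cases hs : s = q
        · subst hs; simp [hcq]
        · simp [beq_eq_false_iff_ne.mpr hs, hc s]) hv
    | none =>
      have hcq : r.contains q = false := (PySem.Dict.get?_eq_none_iff_contains r q).mp hq
      have hccq : c.contains q = false := by rw [hc q]; exact hcq
      have hins : (if r.size = 0 then r.insert q 0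
          else
            match PySem.List.max? (r.keys.map (fun el => r.getD el 0)) (fun x => x) with
            | some max_ind => r.insert q (max_ind + 1)
            | none => r.insert q 0) = r.insert q (r.size : Int) := by
        by_cases h0 : r.size = 0
        · rw [if_pos h0, h0]; rfl
        · rw [if_neg h0]
          have hkeys : r.keys.map (fun el => r.getD el 0) = r.values :=
            (PySem.Dict.values_eq_map_keys r hnd 0).symm
          rw [hkeys, hv, pv_maxVal r.size (Nat.pos_of_ne_zero h0)]
          show r.insert q (((r.size : Int) - 1) + 1) = r.insert q (r.size : Int)
          congr 1
          ring
      have hA : pvStepA (c, r, out) q = pvStF (c, r, out) q := by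
        simp only [pvStepA, pvStF, hq, hins]
        have hrk : pvRkStep r q = r.insert q (r.size : Int) := by
          simp [pvRkStep, hcq]
        refine Prod.ext ?_ (Prod.ext ?_ ?_)
        · show c.insert q 1 = c.insert q (c.getD q 0 + 1)
          rw [PySem.Dict.getD_of_not_contains c 0 hccq]
          norm_num
        · exact hrk.symm
        · show out ++ ["CREATE VIEW " ++ ("query" ++ PySem.Int.toStr ((r.insert q (r.size : Int)).getD q 0) ++ "view0") ++ " " ++ q] =
            out ++ [pvMkStmt ((pvRkStep r q).getD q 0) (c.getD q 0) q]
          rw [hrk, PySem.Dict.getD_of_not_contains c 0 hccq]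
          simp only [pvMkStmt, pv_strB]
      rw [hA]
      have hrk : pvRkStep r q = r.insert q (r.size : Int) := by simp [pvRkStep, hcq]
      have h1 : pvStF (c, r, out) q =
          (c.insert q (c.getD q 0 + 1), r.insert q (r.size : Int),
           out ++ [pvMkStmt ((pvRkStep r q).getD q 0) (c.getD q 0) q]) := by
        simp only [pvStF, hrk]
      rw [h1]
      refine ih _ _ _ (PySem.Dict.nodup_keys_insert r q _ hnd) (fun s => ?_) ?_
      · rw [PySem.Dict.contains_insert, PySem.Dict.contains_insert]
        by_cases hs : s = q
        · subst hs; simp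
        · simp [beq_eq_false_iff_ne.mpr hs, hc s]
      · have hitems := PySem.Dict.items_insert_of_not_contains r (r.size : Int) hcq
        show (r.insert q (r.size : Int)).values = _
        have hval : (r.insert q (r.size : Int)).values = r.values ++ [(r.size : Int)] := by
          simp [PySem.Dict.values, hitems]
        have hsz' : (r.insert q (r.size : Int)).size = r.size + 1 := by
          rw [PySem.Dict.size_insert]; simp [hcq]
        rw [hval, hsz', hv, List.range_succ]
        simp

-- ===== VERDICT (by name: the statement is the Claim_ definition above) =====
theorem account_for_dups_spec : Claim_equal_account_for_dups := by
  intro l _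
  show account_for_dups l = account_for_dups_alt l
  unfold account_for_dups account_for_dups_alt
  rw [pv_A_eq_fused l _ _ _ (by simp) (fun s => by simp) (by rfl), pv_fused_eq_B]
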